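-- pv_equiv track=rewrite | github.com/fayeeza-shaikh/GatorGrad_Masters_Project_Fayeeza_Shaikh | career_guide.py | _build_skills_summary
-- ===== SOURCE A (Python) =====
-- from typing import List, Dict, Set
--
-- def _build_skills_summary(completed: Set[str], program_code: str) -> Dict[str, str]:
--
--     skill_map = {
--         "Programming": {"CSC 210", "CSC 215", "CSC 220", "CSC 310",
--                         "CSC 340", "CSC 317", "CSC 413", "CSC 648"},
--         "Mathematics": {"MATH 124", "MATH 226", "MATH 227", "MATH 225",
--                         "MATH 324", "CSC 230"},
--         "Science": {"CHEM 115", "CHEM 116", "PHYS 111", "PHYS 220",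
--                      "PHYS 230", "BIOL 100", "BIOL 230", "BIOL 240"},
--         "Research": {"PSY 371", "PSY 400", "BIOL 330", "CHEM 315"},
--         "Communication": {"ENG 114", "COMM 150", "CSC 300GW", "PSY 305GW",
--                            "BUS 360"},
--         "Systems & Hardware": {"CSC 256", "CSC 415", "ENGR 301", "ENGR 302"},
--     }
--
--     summary = {}
--     for skill, courses in skill_map.items():
--         count = len(completed.intersection(courses))
--
--         if count == 0:
--             level = "Not started"
--         elif count == 1:
--             level = f"Basic ({count} course)"
--         elif count <= 3:
--             level = f"Moderate ({count} courses)"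
--         else:
--             level = f"Strong ({count} courses)"
--
--         summary[skill] = level
--
--     return summary
-- ===== SOURCE B (Python) =====
-- def _build_skills_summary(completed, program_code):
--     skill_map = {
--         "Programming": {"CSC 210", "CSC 215", "CSC 220", "CSC 310",
--                         "CSC 340", "CSC 317", "CSC 413", "CSC 648"},
--         "Mathematics": {"MATH 124", "MATH 226", "MATH 227", "MATH 225",
--                         "MATH 324", "CSC 230"},
--         "Science": {"CHEM 115", "CHEM 116", "PHYS 111", "PHYS 220",
--                      "PHYS 230", "BIOL 100", "BIOL 230", "BIOL 240"},
--         "Research": {"PSY 371", "PSY 400", "BIOL 330", "CHEM 315"},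
--         "Communication": {"ENG 114", "COMM 150", "CSC 300GW", "PSY 305GW",
--                            "BUS 360"},
--         "Systems & Hardware": {"CSC 256", "CSC 415", "ENGR 301", "ENGR 302"},
--     }
--     # inverted index: course -> its (unique) category
--     course2cat = {course: cat for cat, courses in skill_map.items()
--                   for course in courses}
--     counts = {cat: 0 for cat in skill_map}
--     for course in completed:
--         cat = course2cat.get(course)
--         if cat is not None:
--             counts[cat] = counts[cat] + 1
--     return {cat: _level(n) for cat, n in counts.items()}
--
--
-- def _level(n):
--     if n == 0:
--         return "Not started"
--     if n == 1:
--         return f"Basic ({n} course)"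
--     if n <= 3:
--         return f"Moderate ({n} courses)"
--     return f"Strong ({n} courses)"
-- ===== Notes on version B (the rewrite author's own statement) =====
-- stated objective: idiomatic
-- what changed: Instead of intersecting the completed set with each category's course set, B builds an inverted index course->category once, counts category hits in a single pass over the completed courses, and then renders each count to a level string.
import Mathlib
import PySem

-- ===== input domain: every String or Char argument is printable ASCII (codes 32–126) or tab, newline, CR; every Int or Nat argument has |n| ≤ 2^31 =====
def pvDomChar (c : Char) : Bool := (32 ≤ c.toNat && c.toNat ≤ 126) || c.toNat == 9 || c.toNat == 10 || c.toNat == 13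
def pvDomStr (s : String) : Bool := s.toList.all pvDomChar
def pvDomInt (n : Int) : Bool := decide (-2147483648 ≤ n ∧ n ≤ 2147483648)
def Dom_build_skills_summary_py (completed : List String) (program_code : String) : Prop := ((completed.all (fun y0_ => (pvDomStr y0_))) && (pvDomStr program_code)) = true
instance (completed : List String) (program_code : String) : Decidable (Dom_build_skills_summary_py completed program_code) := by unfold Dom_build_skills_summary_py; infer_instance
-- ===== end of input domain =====

-- B replaces the per-category set intersections by an inverted course→category index and a
-- single counting pass over the completed courses (idiomatic restructuring, same cost class).


-- ===== PORT A =====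
-- skill_map, as a list of (category, course set) in insertion order
def skillMapA : List (String × List String) :=
  [("Programming", ["CSC 210", "CSC 215", "CSC 220", "CSC 310", "CSC 340", "CSC 317", "CSC 413", "CSC 648"]),
   ("Mathematics", ["MATH 124", "MATH 226", "MATH 227", "MATH 225", "MATH 324", "CSC 230"]),
   ("Science", ["CHEM 115", "CHEM 116", "PHYS 111", "PHYS 220", "PHYS 230", "BIOL 100", "BIOL 230", "BIOL 240"]),
   ("Research", ["PSY 371", "PSY 400", "BIOL 330", "CHEM 315"]),
   ("Communication", ["ENG 114", "COMM 150", "CSC 300GW", "PSY 305GW", "BUS 360"]),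
   ("Systems & Hardware", ["CSC 256", "CSC 415", "ENGR 301", "ENGR 302"])]

def build_skills_summary_py (completed : List String) (program_code : String) : List (String × String) :=
  (skillMapA.foldl (fun summary p =>
      let count : Int := PySem.Set.len (PySem.Set.inter completed p.2)
      let level : String :=
        if count = 0 then "Not started"
        else if count = 1 then "Basic (" ++ PySem.Int.toStr count ++ " course)"
        else if count ≤ 3 then "Moderate (" ++ PySem.Int.toStr count ++ " courses)"
        else "Strong (" ++ PySem.Int.toStr count ++ " courses)"
      PySem.Dict.insert summary p.1 level)
    PySem.Dict.empty).items

-- ===== PORT B =====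
def skillMapB : List (String × List String) :=
  [("Programming", ["CSC 210", "CSC 215", "CSC 220", "CSC 310", "CSC 340", "CSC 317", "CSC 413", "CSC 648"]),
   ("Mathematics", ["MATH 124", "MATH 226", "MATH 227", "MATH 225", "MATH 324", "CSC 230"]),
   ("Science", ["CHEM 115", "CHEM 116", "PHYS 111", "PHYS 220", "PHYS 230", "BIOL 100", "BIOL 230", "BIOL 240"]),
   ("Research", ["PSY 371", "PSY 400", "BIOL 330", "CHEM 315"]),
   ("Communication", ["ENG 114", "COMM 150", "CSC 300GW", "PSY 305GW", "BUS 360"]),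
   ("Systems & Hardware", ["CSC 256", "CSC 415", "ENGR 301", "ENGR 302"])]

-- inverted index: course → its (unique) category
def course2cat : PySem.Dict String String :=
  skillMapB.foldl (fun d p => p.2.foldl (fun d c => PySem.Dict.insert d c p.1) d) PySem.Dict.empty

def levelB (n : Int) : String :=
  if n = 0 then "Not started"
  else if n = 1 then "Basic (" ++ PySem.Int.toStr n ++ " course)"
  else if n ≤ 3 then "Moderate (" ++ PySem.Int.toStr n ++ " courses)"
  else "Strong (" ++ PySem.Int.toStr n ++ " courses)"

def build_skills_summary_py_alt (completed : List String) (program_code : String) : List (String × String) :=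
  let counts0 : PySem.Dict String Int :=
    skillMapB.foldl (fun d p => PySem.Dict.insert d p.1 0) PySem.Dict.empty
  let counts : PySem.Dict String Int :=
    completed.foldl (fun d course =>
      match PySem.Dict.get? course2cat course with
      | some cat => PySem.Dict.insert d cat (PySem.Dict.getD d cat 0 + 1)
      | none => d) counts0
  counts.items.map (fun p => (p.1, levelB p.2))

-- ===== PRECONDITION & SPEC =====
def Spec_build_skills_summary_py (completed : List String) (program_code : String) (out : List (String × String)) : Prop := out = build_skills_summary_py_alt completed program_code
instance (completed : List String) (program_code : String) (out : List (String × String)) : Decidable (Spec_build_skills_summary_py completed program_code out) := by unfold Spec_build_skills_summary_py; infer_instance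

-- ===== CLAIM (what is proved, stated in full; the proofs are below) =====
def Claim_equal_build_skills_summary_py : Prop := ∀ (completed : List String) (program_code : String), Dom_build_skills_summary_py completed program_code → Spec_build_skills_summary_py completed program_code (build_skills_summary_py completed program_code)

-- ===== LEMMAS AND PROOFS =====

set_option maxRecDepth 40000

-- the six course lists
def csP : List String := ["CSC 210", "CSC 215", "CSC 220", "CSC 310", "CSC 340", "CSC 317", "CSC 413", "CSC 648"]
def csM : List String := ["MATH 124", "MATH 226", "MATH 227", "MATH 225", "MATH 324", "CSC 230"]
def csS : List String := ["CHEM 115", "CHEM 116", "PHYS 111", "PHYS 220", "PHYS 230", "BIOL 100", "BIOL 230", "BIOL 240"]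
def csR : List String := ["PSY 371", "PSY 400", "BIOL 330", "CHEM 315"]
def csC : List String := ["ENG 114", "COMM 150", "CSC 300GW", "PSY 305GW", "BUS 360"]
def csH : List String := ["CSC 256", "CSC 415", "ENGR 301", "ENGR 302"]

def allCourses : List String := csP ++ csM ++ csS ++ csR ++ csC ++ csH

-- B's per-category count, stated as a countP over the classifier
def cntB (c : String) (l : List String) : Int :=
  ((l.countP (fun x => PySem.Dict.get? course2cat x == some c)) : Int)

-- the classifier returns none on a string that is no course at all
theorem classify_none (x : String) (hx : x ∉ allCourses) :
    PySem.Dict.get? course2cat x = none := by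
  rw [PySem.Dict.get?_eq_none_iff_not_mem_keys]
  have hk : course2cat.keys = allCourses := by decide
  rw [hk]; exact hx

-- the classifier only ever returns one of the six category names
theorem classify_values (x : String) :
    PySem.Dict.get? course2cat x = none ∨
    PySem.Dict.get? course2cat x = some "Programming" ∨
    PySem.Dict.get? course2cat x = some "Mathematics" ∨
    PySem.Dict.get? course2cat x = some "Science" ∨
    PySem.Dict.get? course2cat x = some "Research" ∨
    PySem.Dict.get? course2cat x = some "Communication" ∨
    PySem.Dict.get? course2cat x = some "Systems & Hardware" := by
  by_cases hx : x ∈ allCourses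
  · simp only [allCourses, csP, csM, csS, csR, csC, csH, List.mem_append, List.mem_cons,
      List.not_mem_nil, or_false] at hx
    rcases hx with ((((h|h)|h)|h)|h)|h <;>
      rcases h with rfl|rfl|rfl|rfl|rfl|rfl|rfl|rfl <;> decide
  · exact Or.inl (classify_none x hx)

-- pointwise: membership in a category's course list ≡ the classifier returning that category
theorem pt_spec (cs : List String) (c : String)
    (hcs : cs = csP ∧ c = "Programming" ∨ cs = csM ∧ c = "Mathematics" ∨
           cs = csS ∧ c = "Science" ∨ cs = csR ∧ c = "Research" ∨
           cs = csC ∧ c = "Communication" ∨ cs = csH ∧ c = "Systems & Hardware")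
    (x : String) : (x ∈ cs) ↔ (PySem.Dict.get? course2cat x = some c) := by
  by_cases hx : x ∈ allCourses
  · simp only [allCourses, csP, csM, csS, csR, csC, csH, List.mem_append, List.mem_cons,
      List.not_mem_nil, or_false] at hx
    rcases hcs with ⟨rfl, rfl⟩|⟨rfl, rfl⟩|⟨rfl, rfl⟩|⟨rfl, rfl⟩|⟨rfl, rfl⟩|⟨rfl, rfl⟩ <;>
      rcases hx with ((((h|h)|h)|h)|h)|h <;>
      rcases h with rfl|rfl|rfl|rfl|rfl|rfl|rfl|rfl <;> decide
  · have hn := classify_none x hx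
    have hxc : x ∉ cs := fun hmem => hx (by
      rcases hcs with ⟨rfl, -⟩|⟨rfl, -⟩|⟨rfl, -⟩|⟨rfl, -⟩|⟨rfl, -⟩|⟨rfl, -⟩ <;>
        simp [allCourses, hmem])
    simp [hn, hxc]

-- A's per-category count equals B's
theorem count_A_eq_B (cs : List String) (c : String)
    (hcs : cs = csP ∧ c = "Programming" ∨ cs = csM ∧ c = "Mathematics" ∨
           cs = csS ∧ c = "Science" ∨ cs = csR ∧ c = "Research" ∨
           cs = csC ∧ c = "Communication" ∨ cs = csH ∧ c = "Systems & Hardware")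
    (l : List String) : PySem.Set.len (PySem.Set.inter l cs) = cntB c l := by
  have hcount : l.countP (fun x => cs.contains x) =
      l.countP (fun x => PySem.Dict.get? course2cat x == some c) :=
    List.countP_congr (fun x _ => by
      simpa using (pt_spec cs c hcs x))
  simp only [PySem.Set.len, PySem.Set.inter, cntB, ← List.countP_eq_length_filter]
  exact_mod_cast hcount

-- a literal six-key counts dict
def mkd (a b c d e f : Int) : PySem.Dict String Int :=
  PySem.Dict.mk [("Programming", a), ("Mathematics", b), ("Science", c),
                 ("Research", d), ("Communication", e), ("Systems & Hardware", f)]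

theorem step_P (a b c d e f : Int) :
    PySem.Dict.insert (mkd a b c d e f) "Programming" (PySem.Dict.getD (mkd a b c d e f) "Programming" 0 + 1) = mkd (a+1) b c d e f := by
  simp [mkd, PySem.Dict.insert, PySem.Dict.contains, PySem.Dict.getD, PySem.Dict.get?]
theorem step_M (a b c d e f : Int) :
    PySem.Dict.insert (mkd a b c d e f) "Mathematics" (PySem.Dict.getD (mkd a b c d e f) "Mathematics" 0 + 1) = mkd a (b+1) c d e f := by
  simp [mkd, PySem.Dict.insert, PySem.Dict.contains, PySem.Dict.getD, PySem.Dict.get?]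
theorem step_S (a b c d e f : Int) :
    PySem.Dict.insert (mkd a b c d e f) "Science" (PySem.Dict.getD (mkd a b c d e f) "Science" 0 + 1) = mkd a b (c+1) d e f := by
  simp [mkd, PySem.Dict.insert, PySem.Dict.contains, PySem.Dict.getD, PySem.Dict.get?]
theorem step_R (a b c d e f : Int) :
    PySem.Dict.insert (mkd a b c d e f) "Research" (PySem.Dict.getD (mkd a b c d e f) "Research" 0 + 1) = mkd a b c (d+1) e f := by
  simp [mkd, PySem.Dict.insert, PySem.Dict.contains, PySem.Dict.getD, PySem.Dict.get?]
theorem step_C (a b c d e f : Int) :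
    PySem.Dict.insert (mkd a b c d e f) "Communication" (PySem.Dict.getD (mkd a b c d e f) "Communication" 0 + 1) = mkd a b c d (e+1) f := by
  simp [mkd, PySem.Dict.insert, PySem.Dict.contains, PySem.Dict.getD, PySem.Dict.get?]
theorem step_H (a b c d e f : Int) :
    PySem.Dict.insert (mkd a b c d e f) "Systems & Hardware" (PySem.Dict.getD (mkd a b c d e f) "Systems & Hardware" 0 + 1) = mkd a b c d e (f+1) := by
  simp [mkd, PySem.Dict.insert, PySem.Dict.contains, PySem.Dict.getD, PySem.Dict.get?]

-- characterization of B's counting loop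
theorem counts_foldl (l : List String) (a b c d e f : Int) :
    (l.foldl (fun d course =>
        match PySem.Dict.get? course2cat course with
        | some cat => PySem.Dict.insert d cat (PySem.Dict.getD d cat 0 + 1)
        | none => d)
      (mkd a b c d e f)) =
    mkd (a + cntB "Programming" l) (b + cntB "Mathematics" l) (c + cntB "Science" l)
        (d + cntB "Research" l) (e + cntB "Communication" l) (f + cntB "Systems & Hardware" l) := by
  induction l generalizing a b c d e f with
  | nil => simp [cntB]
  | cons x l ih =>
    rw [List.foldl_cons]
    rcases classify_values x with h|h|h|h|h|h|h <;> simp only [h] <;>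
      [skip; rw [step_P]; rw [step_M]; rw [step_S]; rw [step_R]; rw [step_C]; rw [step_H]] <;>
      rw [ih] <;>
      simp only [mkd, cntB, List.countP_cons, h, PySem.Dict.mk.injEq, List.cons.injEq,
        Prod.mk.injEq, and_true, true_and] <;>
      norm_num <;> omega

-- explicit form of A's result
theorem A_eq (completed : List String) (pc : String) :
    build_skills_summary_py completed pc =
    [("Programming", levelB (PySem.Set.len (PySem.Set.inter completed csP))),
     ("Mathematics", levelB (PySem.Set.len (PySem.Set.inter completed csM))),
     ("Science", levelB (PySem.Set.len (PySem.Set.inter completed csS))),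
     ("Research", levelB (PySem.Set.len (PySem.Set.inter completed csR))),
     ("Communication", levelB (PySem.Set.len (PySem.Set.inter completed csC))),
     ("Systems & Hardware", levelB (PySem.Set.len (PySem.Set.inter completed csH)))] := by
  simp [build_skills_summary_py, skillMapA, List.foldl, PySem.Dict.insert, PySem.Dict.contains,
        PySem.Dict.empty, levelB, csP, csM, csS, csR, csC, csH]

-- explicit form of B's result
theorem B_eq (completed : List String) (pc : String) :
    build_skills_summary_py_alt completed pc =
    [("Programming", levelB (cntB "Programming" completed)),
     ("Mathematics", levelB (cntB "Mathematics" completed)),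
     ("Science", levelB (cntB "Science" completed)),
     ("Research", levelB (cntB "Research" completed)),
     ("Communication", levelB (cntB "Communication" completed)),
     ("Systems & Hardware", levelB (cntB "Systems & Hardware" completed))] := by
  simp only [build_skills_summary_py_alt]
  have h0 : skillMapB.foldl (fun d p => PySem.Dict.insert d p.1 (0 : Int)) PySem.Dict.empty =
mkd 0 0 0 0 0 0 := by rfl
  rw [h0, counts_foldl]
  simp [mkd, List.map]

-- ===== VERDICT (by name: the statement is the Claim_ definition above) =====
theorem build_skills_summary_py_spec : Claim_equal_build_skills_summary_py := by
  intro completed pc _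
  unfold Spec_build_skills_summary_py
  rw [A_eq, B_eq,
      count_A_eq_B csP "Programming" (Or.inl ⟨rfl, rfl⟩),
      count_A_eq_B csM "Mathematics" (Or.inr (Or.inl ⟨rfl, rfl⟩)),
      count_A_eq_B csS "Science" (Or.inr (Or.inr (Or.inl ⟨rfl, rfl⟩))),
      count_A_eq_B csR "Research" (Or.inr (Or.inr (Or.inr (Or.inl ⟨rfl, rfl⟩)))),
      count_A_eq_B csC "Communication" (Or.inr (Or.inr (Or.inr (Or.inr (Or.inl ⟨rfl, rfl⟩))))),
      count_A_eq_B csH "Systems & Hardware" (Or.inr (Or.inr (Or.inr (Or.inr (Or.inr ⟨rfl, rfl⟩)))))]
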